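-- pv_equiv track=rewrite | github.com/AlessandraH/TCC_Classif_Estrutura_Retorica_Embeddings | functions.py | to_sentences
-- ===== SOURCE A (Python) =====
-- def to_sentences(abstracts, senteces_max=None):
--     sentences = []
--     labels = []
--     abstracts_sentences = []
--     abstracts_labels = []
--     ids = []
--
--     for id, abstract in enumerate(abstracts):
--         if senteces_max and len(abstract) > senteces_max:
--             continue
--
--         tmp_sentences = []
--         tmp_labels = []
--
--         for label, text in abstract:
--             sentences.append(text)
--             labels.append(label)
--
--             tmp_sentences.append(text)
--             tmp_labels.append(label)
--             ids.append(id)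
--
--         abstracts_sentences.append(tmp_sentences)
--         abstracts_labels.append(tmp_labels)
--
--     assert (len(sentences) == len(labels))
--     assert (len(abstracts_sentences) == len(abstracts_labels))
--
--     return sentences, labels, abstracts_sentences, abstracts_labels, ids
-- ===== SOURCE B (Python) =====
-- def to_sentences(abstracts, senteces_max=None):
--     keep = [(i, ab) for i, ab in enumerate(abstracts)
--             if not senteces_max or len(ab) <= senteces_max]
--     abstracts_sentences = [[text for _, text in ab] for _, ab in keep]
--     abstracts_labels = [[label for label, _ in ab] for _, ab in keep]
--     sentences = [t for sub in abstracts_sentences for t in sub]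
--     labels = [l for sub in abstracts_labels for l in sub]
--     ids = [i for i, ab in keep for _ in ab]
--     assert (len(sentences) == len(labels))
--     assert (len(abstracts_sentences) == len(abstracts_labels))
--     return sentences, labels, abstracts_sentences, abstracts_labels, ids
-- ===== Notes on version B (the rewrite author's own statement) =====
-- stated objective: idiomatic
-- what changed: Replaces the single interleaved append loop with a filter-once-then-comprehensions decomposition: kept abstracts are selected first, the nested lists are built by comprehensions, and the flat lists are derived by flattening them.
import Mathlib
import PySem

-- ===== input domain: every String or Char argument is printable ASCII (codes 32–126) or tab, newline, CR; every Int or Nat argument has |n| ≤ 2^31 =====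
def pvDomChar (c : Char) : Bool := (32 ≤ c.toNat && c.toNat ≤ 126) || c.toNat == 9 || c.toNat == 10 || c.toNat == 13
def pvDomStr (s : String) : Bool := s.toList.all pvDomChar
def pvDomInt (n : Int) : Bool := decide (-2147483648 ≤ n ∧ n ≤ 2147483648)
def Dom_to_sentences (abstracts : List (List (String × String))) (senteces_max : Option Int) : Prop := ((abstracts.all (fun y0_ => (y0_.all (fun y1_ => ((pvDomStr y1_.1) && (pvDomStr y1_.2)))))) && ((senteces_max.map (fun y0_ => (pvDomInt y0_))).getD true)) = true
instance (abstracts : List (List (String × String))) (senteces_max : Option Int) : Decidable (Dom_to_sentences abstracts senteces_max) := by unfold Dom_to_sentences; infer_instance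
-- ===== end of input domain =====

-- B replaces A's single interleaved append loop by a filter-once-then-comprehensions
-- decomposition (same values; objective: idiomatic, no speed claim).


-- ===== PORT A =====
-- 'senteces_max and len(abstract) > senteces_max' (truthiness of the int: 0/None are falsy)
def pySkipA (m : Option Int) (len : Int) : Bool :=
  match m with
  | none => false
  | some n => decide (n ≠ 0) && decide (len > n)

-- body of A's inner 'for label, text in abstract' loop (5 appends, id captured)
def innerStepA (i : Int)
    (st : List String × List String × List String × List String × List Int)
    (lt : String × String) :
    List String × List String × List String × List String × List Int :=
  (st.1 ++ [lt.2], st.2.1 ++ [lt.1], st.2.2.1 ++ [lt.2], st.2.2.2.1 ++ [lt.1],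
   st.2.2.2.2 ++ [i])

def to_sentences (abstracts : List (List (String × String))) (senteces_max : Option Int) : List String × List String × List (List String) × List (List String) × List Int :=
  (PySem.List.enumerate abstracts).foldl
    (fun acc p =>
      if pySkipA senteces_max (p.2.length : Int) then acc
      else
        let inner := p.2.foldl (innerStepA p.1) (acc.1, acc.2.1, [], [], acc.2.2.2.2)
        (inner.1, inner.2.1, acc.2.2.1 ++ [inner.2.2.1], acc.2.2.2.1 ++ [inner.2.2.2.1],
         inner.2.2.2.2))
    ([], [], [], [], [])

-- ===== PORT B =====
-- 'not senteces_max or len(ab) <= senteces_max'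
def keepB (m : Option Int) (ab : List (String × String)) : Bool :=
  match m with
  | none => true
  | some n => decide (n = 0) || decide ((ab.length : Int) ≤ n)

def to_sentences_alt (abstracts : List (List (String × String))) (senteces_max : Option Int) : List String × List String × List (List String) × List (List String) × List Int :=
  let kept := (PySem.List.enumerate abstracts).filter (fun p => keepB senteces_max p.2)
  let abs_s := kept.map (fun p => p.2.map (·.2))
  let abs_l := kept.map (fun p => p.2.map (·.1))
  (abs_s.flatMap id, abs_l.flatMap id, abs_s, abs_l,
   kept.flatMap (fun p => p.2.map (fun _ => p.1)))

-- ===== PRECONDITION & SPEC =====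
def Spec_to_sentences (abstracts : List (List (String × String))) (senteces_max : Option Int) (out : List String × List String × List (List String) × List (List String) × List Int) : Prop := out = to_sentences_alt abstracts senteces_max
instance (abstracts : List (List (String × String))) (senteces_max : Option Int) (out : List String × List String × List (List String) × List (List String) × List Int) : Decidable (Spec_to_sentences abstracts senteces_max out) := by unfold Spec_to_sentences; infer_instance

-- ===== CLAIM (what is proved, stated in full; the proofs are below) =====
def Claim_equal_to_sentences : Prop := ∀ (abstracts : List (List (String × String))) (senteces_max : Option Int), Dom_to_sentences abstracts senteces_max → Spec_to_sentences abstracts senteces_max (to_sentences abstracts senteces_max)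

-- ===== LEMMAS AND PROOFS =====

lemma pySkipA_eq_not_keepB (m : Option Int) (ab : List (String × String)) :
    pySkipA m (ab.length : Int) = !(keepB m ab) := by
  cases m with
  | none => rfl
  | some n =>
    simp only [pySkipA, keepB]
    by_cases h : n = 0 <;> by_cases h2 : ((ab.length : Int) ≤ n) <;>
      simp [h, h2] <;> omega

lemma innerA_eq (i : Int) (ab : List (String × String))
    (S L X Y : List String) (I : List Int) :
    ab.foldl (innerStepA i) (S, L, X, Y, I) =
      (S ++ ab.map (·.2), L ++ ab.map (·.1), X ++ ab.map (·.2), Y ++ ab.map (·.1),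
       I ++ ab.map (fun _ => i)) := by
  induction ab generalizing S L X Y I with
  | nil => simp
  | cons hd tl ih => simp [innerStepA, ih]

lemma outer_fold_eq (m : Option Int) (abstracts : List (List (String × String)))
    (s : Int) (S L : List String) (AS AL : List (List String)) (I : List Int) :
    (PySem.List.enumerate abstracts s).foldl
      (fun acc p =>
        if pySkipA m (p.2.length : Int) then acc
        else
          let inner := p.2.foldl (innerStepA p.1) (acc.1, acc.2.1, [], [], acc.2.2.2.2)
          (inner.1, inner.2.1, acc.2.2.1 ++ [inner.2.2.1], acc.2.2.2.1 ++ [inner.2.2.2.1],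
           inner.2.2.2.2))
      (S, L, AS, AL, I) =
      (let kept := (PySem.List.enumerate abstracts s).filter (fun p => keepB m p.2)
       (S ++ kept.flatMap (fun p => p.2.map (·.2)),
        L ++ kept.flatMap (fun p => p.2.map (·.1)),
        AS ++ kept.map (fun p => p.2.map (·.2)),
        AL ++ kept.map (fun p => p.2.map (·.1)),
        I ++ kept.flatMap (fun p => p.2.map (fun _ => p.1)))) := by
  induction abstracts generalizing s S L AS AL I with
  | nil => simp [PySem.List.enumerate]
  | cons hd tl ih =>
    rw [PySem.List.enumerate_cons]
    simp only [List.foldl_cons, List.filter_cons]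
    rw [pySkipA_eq_not_keepB]
    cases hk : keepB m hd with
    | false => simp [ih]
    | true =>
      simp only [Bool.not_true, Bool.false_eq_true, if_false, reduceIte]
      rw [innerA_eq, ih]
      simp

-- ===== VERDICT (by name: the statement is the Claim_ definition above) =====
theorem to_sentences_spec : Claim_equal_to_sentences := by
  intro abstracts m _
  show to_sentences abstracts m = to_sentences_alt abstracts m
  unfold to_sentences to_sentences_alt
  rw [outer_fold_eq]
  simp [List.flatMap_def]
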